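-- pv_equiv track=rewrite | github.com/Bharath-Naveen/containerized-phishing-project | src/app_v1/ai_adjudicator.py | _auth_like_url
-- ===== SOURCE A (Python) =====
-- def _auth_like_url(url: str) -> bool:
--     s = (url or "").lower()
--     return any(
--         t in s
--         for t in (
--             "login",
--             "signin",
--             "verify",
--             "account",
--             "recovery",
--             "checkout",
--             "billing",
--             "dashboard",
--             "admin",
--             "portal",
--         )
--     )
-- ===== SOURCE B (Python) =====
-- import re
--
-- _AUTH_RE = re.compile(
--     "login|signin|verify|account|recovery|checkout|billing|dashboard|admin|portal"
-- )
--
-- def _auth_like_url(url: str) -> bool: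
--     return _AUTH_RE.search((url or "").lower()) is not None
-- ===== Notes on version B (the rewrite author's own statement) =====
-- stated objective: idiomatic
-- what changed: Replaces the per-token membership loop (ten separate substring scans) with one precompiled regex alternation searched once over the lowercased URL; the Lean port of B is a single left-to-right scan that tests all tokens as prefixes at each position.
import Mathlib
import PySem

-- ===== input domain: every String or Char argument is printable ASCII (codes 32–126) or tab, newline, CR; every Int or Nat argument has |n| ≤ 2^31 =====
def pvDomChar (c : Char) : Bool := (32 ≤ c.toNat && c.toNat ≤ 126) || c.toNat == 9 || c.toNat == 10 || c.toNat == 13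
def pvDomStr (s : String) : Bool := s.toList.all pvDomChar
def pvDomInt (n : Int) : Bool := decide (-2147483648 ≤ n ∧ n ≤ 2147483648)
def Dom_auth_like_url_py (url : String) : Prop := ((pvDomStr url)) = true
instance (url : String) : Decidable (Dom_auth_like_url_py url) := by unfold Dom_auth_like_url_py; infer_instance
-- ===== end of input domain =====

-- B replaces A's ten separate substring scans by one regex alternation / single left-to-right pass (idiomatic; same result).

-- ===== PORT A =====
-- A: s = (url or "").lower(); any(t in s for t in (...ten tokens...))
def auth_like_url_py (url : String) : Bool :=
  let s := PySem.Str.lower (if url = "" then "" else url)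
  ["login", "signin", "verify", "account", "recovery", "checkout",
   "billing", "dashboard", "admin", "portal"].any (fun t => PySem.Str.isIn t s)

-- ===== PORT B =====
-- the alternation's branches, as char lists
def pvAuthTokens : List (List Char) :=
  ["login".toList, "signin".toList, "verify".toList, "account".toList,
   "recovery".toList, "checkout".toList, "billing".toList, "dashboard".toList,
   "admin".toList, "portal".toList]

-- one left-to-right scan: at each position try every alternation branch as a prefix
-- (the regex engine's search over the lowercased string)
def pvAuthScan (cs : List Char) : Bool :=
  match cs with
  | [] => false
  | _ :: rest => if pvAuthTokens.any (fun t => t.isPrefixOf cs) then true else pvAuthScan rest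

def auth_like_url_py_alt (url : String) : Bool :=
  pvAuthScan (PySem.Chars.lower (if url = "" then "" else url).toList)

-- ===== PRECONDITION & SPEC =====
def Spec_auth_like_url_py (url : String) (out : Bool) : Prop := out = auth_like_url_py_alt url
instance (url : String) (out : Bool) : Decidable (Spec_auth_like_url_py url out) := by unfold Spec_auth_like_url_py; infer_instance

-- ===== CLAIM (what is proved, stated in full; the proofs are below) =====
def Claim_equal_auth_like_url_py : Prop := ∀ (url : String), Dom_auth_like_url_py url → Spec_auth_like_url_py url (auth_like_url_py url)

-- ===== LEMMAS AND PROOFS =====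
theorem pvAuthScan_iff (cs : List Char) :
    pvAuthScan cs = true ↔ ∃ t ∈ pvAuthTokens, t <:+: cs := by
  induction cs with
  | nil => decide
  | cons c rest ih =>
    rw [pvAuthScan]
    by_cases h : pvAuthTokens.any (fun t => t.isPrefixOf (c :: rest)) = true
    · rw [if_pos h]
      simp only [true_iff]
      obtain ⟨t, ht, hp⟩ := List.any_eq_true.mp h
      exact ⟨t, ht, (List.isPrefixOf_iff_prefix.mp hp).isInfix⟩
    · rw [if_neg h, ih]
      constructor
      · rintro ⟨t, ht, hinf⟩
        exact ⟨t, ht, hinf.trans (List.suffix_cons c rest).isInfix⟩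
      · rintro ⟨t, ht, hinf⟩
        rcases List.infix_cons_iff.mp hinf with hpre | hinf'
        · have hh : pvAuthTokens.any (fun t => t.isPrefixOf (c :: rest)) = true :=
            List.any_eq_true.mpr ⟨t, ht, List.isPrefixOf_iff_prefix.mpr hpre⟩
          exact absurd hh h
        · exact ⟨t, ht, hinf'⟩

theorem pvAuthTokens_eq : pvAuthTokens =
    (["login", "signin", "verify", "account", "recovery", "checkout",
      "billing", "dashboard", "admin", "portal"] : List String).map String.toList := rfl

-- ===== VERDICT (by name: the statement is the Claim_ definition above) =====
theorem auth_like_url_py_spec : Claim_equal_auth_like_url_py := by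
  intro url _
  unfold Spec_auth_like_url_py auth_like_url_py auth_like_url_py_alt
  rw [Bool.eq_iff_iff, pvAuthScan_iff, pvAuthTokens_eq]
  simp only [List.any_eq_true, PySem.Str.isIn_eq, PySem.Str.toList_lower, List.mem_map]
  constructor
  · rintro ⟨t, ht, hIn⟩
    exact ⟨t.toList, ⟨t, ht, rfl⟩, (PySem.Chars.isIn_iff_infix _ _).mp hIn⟩
  · rintro ⟨u, ⟨t, ht, rfl⟩, hinf⟩
    exact ⟨t, ht, (PySem.Chars.isIn_iff_infix _ _).mpr hinf⟩
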